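-- pv_equiv track=rewrite | github.com/noraharhen/Harhen-Bornstein-2023-Overharvesting-as-Rational-Learning | experiment/data_analysis/data_combiner.py | get_prev_galaxies
-- ===== SOURCE A (Python) =====
-- from itertools import groupby
--
-- def get_prev_galaxies(galaxy_data):
--     sub_gal_grouped = [list(j) for i, j in groupby(galaxy_data)]
--     sub_gal_order = [x[0] for x in sub_gal_grouped]
--
--     gal_prev_1 = [100] +sub_gal_order[:-1]
--     gal_prev_2 = [100,100] +sub_gal_order[:-2]
--     gal_prev_3 = [100,100,100] +sub_gal_order[:-3]
--
--     prev_1 = []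
--     prev_2 = []
--     prev_3 = []
--     for g in range(len(sub_gal_grouped)):
--         for planet in range(len(sub_gal_grouped[g])):
--             prev_1.append(gal_prev_1[g])
--             prev_2.append(gal_prev_2[g])
--             prev_3.append(gal_prev_3[g])
--     return prev_1, prev_2, prev_3
-- ===== SOURCE B (Python) =====
-- def get_prev_galaxies(galaxy_data):
--     # single pass with a rolling window of the last three group values (100-filled)
--     p1, p2, p3 = 100, 100, 100
--     prev_1, prev_2, prev_3 = [], [], []
--     first = True
--     prev = None
--     for x in galaxy_data:
--         if not first and x != prev:
--             p1, p2, p3 = prev, p1, p2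
--         prev_1.append(p1)
--         prev_2.append(p2)
--         prev_3.append(p3)
--         prev = x
--         first = False
--     return prev_1, prev_2, prev_3
-- ===== Notes on version B (the rewrite author's own statement) =====
-- stated objective: alternative
-- what changed: Replaced the groupby-then-three-shifted-lists-then-indexed-double-loop construction by a single fused pass over galaxy_data that maintains a rolling window of the last three group values (initialised to 100,100,100) and the previous element, shifting the window at each group boundary.
import Mathlib
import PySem

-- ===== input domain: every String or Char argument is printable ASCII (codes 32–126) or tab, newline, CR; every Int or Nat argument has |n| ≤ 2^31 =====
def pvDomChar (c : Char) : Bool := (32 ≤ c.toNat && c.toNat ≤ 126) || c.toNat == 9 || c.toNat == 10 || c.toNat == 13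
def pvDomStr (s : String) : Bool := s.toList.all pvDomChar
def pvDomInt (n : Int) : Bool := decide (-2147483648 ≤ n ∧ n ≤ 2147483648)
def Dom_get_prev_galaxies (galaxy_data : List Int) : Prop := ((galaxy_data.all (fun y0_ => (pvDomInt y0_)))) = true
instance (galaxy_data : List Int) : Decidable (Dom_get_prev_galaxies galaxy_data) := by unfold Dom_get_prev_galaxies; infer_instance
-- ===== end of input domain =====

-- B replaces A's groupby + three shifted lists + indexed double loop by one fused pass
-- keeping a rolling window of the last three group values; same output, same O(n) cost,
-- with no intermediate group/shifted lists built.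

-- ===== PORT A =====
-- itertools.groupby on a list of ints: consecutive runs of equal elements
def pvGroupby : List Int → List (List Int)
  | [] => []
  | x :: xs => (x :: xs.takeWhile (· == x)) :: pvGroupby (xs.dropWhile (· == x))
termination_by l => l.length
decreasing_by
  simpa [Nat.lt_succ_iff] using xs.length_dropWhile_le (· == x)

-- body of A's outer loop: 'for planet in range(len(sub_gal_grouped[g])): append gal_prev_k[g]'
def pvABody (grouped : List (List Int)) (q1 q2 q3 : List Int)
    (acc : List Int × List Int × List Int) (g : Int) : List Int × List Int × List Int :=
  (PySem.List.pyRange 0 ((PySem.List.pyGetD grouped g []).length) 1).foldl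
    (fun a _ =>
      (a.1 ++ [PySem.List.pyGetD q1 g 0],
       a.2.1 ++ [PySem.List.pyGetD q2 g 0],
       a.2.2 ++ [PySem.List.pyGetD q3 g 0])) acc

def get_prev_galaxies (galaxy_data : List Int) : List Int × List Int × List Int :=
  let sub_gal_grouped := pvGroupby galaxy_data
  let sub_gal_order := sub_gal_grouped.map (fun x => PySem.List.pyGetD x 0 0)
  let gal_prev_1 := [100] ++ PySem.List.slice sub_gal_order none (some (-1))
  let gal_prev_2 := [100, 100] ++ PySem.List.slice sub_gal_order none (some (-2))
  let gal_prev_3 := [100, 100, 100] ++ PySem.List.slice sub_gal_order none (some (-3))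
  (PySem.List.pyRange 0 sub_gal_grouped.length 1).foldl
    (pvABody sub_gal_grouped gal_prev_1 gal_prev_2 gal_prev_3) ([], [], [])

-- ===== PORT B =====
-- loop body of Source B: shift the window (p1,p2,p3) at a group boundary, then record it
def pvAltStep (st : (Int × Int × Int) × Option Int × (List Int × List Int × List Int)) (x : Int) :
    (Int × Int × Int) × Option Int × (List Int × List Int × List Int) :=
  let w := match st.2.1 with
    | some p => if x ≠ p then (p, st.1.1, st.1.2.1) else st.1
    | none => st.1
  (w, some x, (st.2.2.1 ++ [w.1], st.2.2.2.1 ++ [w.2.1], st.2.2.2.2 ++ [w.2.2]))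

def get_prev_galaxies_alt (galaxy_data : List Int) : List Int × List Int × List Int :=
  (galaxy_data.foldl pvAltStep ((100, 100, 100), none, ([], [], []))).2.2

-- ===== PRECONDITION & SPEC =====
def Spec_get_prev_galaxies (galaxy_data : List Int) (out : List Int × List Int × List Int) : Prop := out = get_prev_galaxies_alt galaxy_data
instance (galaxy_data : List Int) (out : List Int × List Int × List Int) : Decidable (Spec_get_prev_galaxies galaxy_data out) := by unfold Spec_get_prev_galaxies; infer_instance

-- ===== CLAIM (what is proved, stated in full; the proofs are below) =====
def Claim_equal_get_prev_galaxies : Prop := ∀ (galaxy_data : List Int), Dom_get_prev_galaxies galaxy_data → Spec_get_prev_galaxies galaxy_data (get_prev_galaxies galaxy_data)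

-- ===== LEMMAS AND PROOFS =====

-- common intermediate: per-group window recursion over the group structure
def pvCanon : Int → Int → Int → List (List Int) → List Int × List Int × List Int
  | _, _, _, [] => ([], [], [])
  | w1, w2, w3, g :: rest =>
    let r := pvCanon (g.getD 0 0) w1 w2 rest
    (List.replicate g.length w1 ++ r.1,
     List.replicate g.length w2 ++ r.2.1,
     List.replicate g.length w3 ++ r.2.2)

-- per-group replication of a constant drawn from a parallel list
def pvMix : List (List Int) → List Int → List Int
  | [], _ => []
  | _ :: _, [] => []
  | g :: gs, c :: q => List.replicate g.length c ++ pvMix gs q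

-- ----- pvGroupby facts -----
theorem pvGroupby_flatten (l : List Int) : (pvGroupby l).flatten = l := by
  induction l using pvGroupby.induct with
  | case1 => simp [pvGroupby]
  | case2 x xs ih =>
    simp [pvGroupby, ih, List.takeWhile_append_dropWhile]

-- chain invariant: every group is a nonempty constant run whose value differs from the previous one
def pvGoodChain : Int → List (List Int) → Prop
  | _, [] => True
  | v, g :: rest => ∃ h t, g = h :: t ∧ (∀ y ∈ t, y = h) ∧ h ≠ v ∧ pvGoodChain h rest

theorem pvGroupby_goodChain (v : Int) (l : List Int)
    (hl : ∀ hne : l ≠ [], l.head hne ≠ v) : pvGoodChain v (pvGroupby l) := by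
  induction l using pvGroupby.induct generalizing v with
  | case1 => simp [pvGroupby, pvGoodChain]
  | case2 x xs ih =>
    rw [pvGroupby]
    refine ⟨x, xs.takeWhile (· == x), rfl, ?_, by simpa using hl (by simp), ?_⟩
    · intro y hy
      simpa using List.mem_takeWhile_imp hy
    · refine ih x ?_
      intro hne
      have := List.head_dropWhile_not (· == x) hne
      simpa using this

-- ----- A side -----
theorem pvInnerLoop (m : Nat) (c1 c2 c3 : Int) (a1 a2 a3 : List Int) :
    (PySem.List.pyRange 0 (m : Int) 1).foldl
      (fun a _ => (a.1 ++ [c1], a.2.1 ++ [c2], a.2.2 ++ [c3])) (a1, a2, a3) =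
      (a1 ++ List.replicate m c1, a2 ++ List.replicate m c2, a3 ++ List.replicate m c3) := by
  induction m generalizing a1 a2 a3 with
  | zero => simp [PySem.List.pyRange_one_eq_nil]
  | succ n ih =>
    have h : ((n + 1 : Nat) : Int) = (n : Int) + 1 := by push_cast; ring
    rw [h, PySem.List.pyRange_one_succ_right (by positivity), List.foldl_append, ih]
    simp [List.replicate_succ']

theorem pvMix_snoc (gs : List (List Int)) (g : List Int) (q : List Int) (h : gs.length < q.length) :
    pvMix (gs ++ [g]) q = pvMix gs q ++ List.replicate g.length (q.getD gs.length 0) := by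
  induction gs generalizing q with
  | nil =>
    match q with
    | c :: q' => simp [pvMix]
  | cons g0 gs' ih =>
    match q with
    | c :: q' =>
      simp only [List.cons_append, pvMix, List.length_cons, List.getD_cons_succ]
      rw [ih q' (by simpa using Nat.lt_of_succ_lt_succ h), List.append_assoc]

theorem pvLoopA (gs : List (List Int)) (q1 q2 q3 : List Int)
    (h1 : gs.length ≤ q1.length) (h2 : gs.length ≤ q2.length) (h3 : gs.length ≤ q3.length)
    (a1 a2 a3 : List Int) :
    (PySem.List.pyRange 0 (gs.length : Int) 1).foldl (pvABody gs q1 q2 q3) (a1, a2, a3) =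
      (a1 ++ pvMix gs q1, a2 ++ pvMix gs q2, a3 ++ pvMix gs q3) := by
  induction gs using List.reverseRecOn generalizing a1 a2 a3 with
  | nil => simp [PySem.List.pyRange_one_eq_nil, pvMix]
  | append_singleton gs' g ih =>
    have hlen : (((gs' ++ [g]).length : Nat) : Int) = ((gs'.length : Nat) : Int) + 1 := by
      simp
    rw [hlen, PySem.List.pyRange_one_succ_right (by positivity), List.foldl_append]
    have hcongr : (PySem.List.pyRange 0 ((gs'.length : Nat) : Int) 1).foldl
        (pvABody (gs' ++ [g]) q1 q2 q3) (a1, a2, a3) =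
        (PySem.List.pyRange 0 ((gs'.length : Nat) : Int) 1).foldl
        (pvABody gs' q1 q2 q3) (a1, a2, a3) := by
      apply PySem.List.foldl_congr_mem
      intro acc i hi
      obtain ⟨hi0, hi1⟩ := (PySem.List.mem_pyRange_one).1 hi
      have hnat : i.toNat < gs'.length := by omega
      unfold pvABody
      rw [PySem.List.pyGetD_eq_getElem (gs' ++ [g]) [] hi0 (by simp; omega),
          PySem.List.pyGetD_eq_getElem gs' [] hi0 (by omega),
          List.getElem_append_left]
    rw [hcongr, ih (by simp at h1; omega) (by simp at h2; omega) (by simp at h3; omega)]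
    unfold pvABody
    simp only [List.foldl_cons, List.foldl_nil]
    have hg : PySem.List.pyGetD (gs' ++ [g]) ((gs'.length : Nat) : Int) [] = g := by
      rw [PySem.List.pyGetD_natCast]
      rw [List.getD_eq_getElem _ _ (by simp)]
      simp
    rw [hg, PySem.List.pyGetD_natCast, PySem.List.pyGetD_natCast, PySem.List.pyGetD_natCast,
        pvInnerLoop]
    rw [pvMix_snoc _ _ _ (by simp at h1; omega), pvMix_snoc _ _ _ (by simp at h2; omega),
        pvMix_snoc _ _ _ (by simp at h3; omega)]
    simp [List.append_assoc]

theorem pvMix_congr (gs : List (List Int)) (q q' : List Int)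
    (h : ∀ i, i < gs.length → q.getD i 0 = q'.getD i 0)
    (hq : gs.length ≤ q.length) (hq' : gs.length ≤ q'.length) :
    pvMix gs q = pvMix gs q' := by
  induction gs generalizing q q' with
  | nil => simp [pvMix]
  | cons g gs' ih =>
    match q, q' with
    | c :: qt, c' :: qt' =>
      have h0 := h 0 (by simp)
      simp only [List.getD_cons_zero] at h0
      simp only [pvMix, h0]
      congr 1
      exact ih qt qt' (fun i hi => by simpa using h (i + 1) (by simp; omega))
        (by simp at hq; omega) (by simp at hq'; omega)

theorem pvCanon_mix (w1 w2 w3 : Int) (gs : List (List Int)) :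
    pvCanon w1 w2 w3 gs =
      (pvMix gs (w1 :: (gs.map (fun x => x.getD 0 0)).dropLast),
       pvMix gs (w2 :: (w1 :: (gs.map (fun x => x.getD 0 0)).dropLast).dropLast),
       pvMix gs (w3 :: (w2 :: (w1 :: (gs.map (fun x => x.getD 0 0)).dropLast).dropLast).dropLast)) := by
  induction gs generalizing w1 w2 w3 with
  | nil => simp [pvCanon, pvMix]
  | cons g rest ih =>
    cases rest with
    | nil => simp [pvCanon, pvMix]
    | cons r rs =>
      have e1 := ih (g.getD 0 0) w1 w2
      simp only [pvCanon, pvMix, List.map_cons, List.dropLast_cons₂, Prod.mk.injEq] at e1 ⊢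
      obtain ⟨f1, f2, f3⟩ := e1
      exact ⟨by rw [List.append_cancel_left f1], by rw [List.append_cancel_left f2],
        by rw [List.append_cancel_left f3]⟩

theorem pv_getD_dropLast (l : List Int) (k : Nat) (hk : k < l.length - 1) :
    l.dropLast.getD k 0 = l.getD k 0 := by
  rw [List.getD_eq_getElem _ _ (by simp [List.length_dropLast]; omega),
      List.getD_eq_getElem _ _ (by omega)]
  exact List.getElem_dropLast ..

theorem pv_getD_take (l : List Int) (m k : Nat) (hk : k < m) (hk2 : k < l.length) :
    (l.take m).getD k 0 = l.getD k 0 := by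
  rw [List.getD_eq_getElem _ _ (by simp [List.length_take]; omega),
      List.getD_eq_getElem _ _ hk2]
  exact List.getElem_take ..

theorem pv_q2_agree (ord : List Int) (i : Nat) (hi : i < ord.length) :
    (100 :: 100 :: ord.take (ord.length - 2)).getD i 0
      = (100 :: (100 :: ord.dropLast).dropLast).getD i 0 := by
  match i with
  | 0 => simp
  | Nat.succ k =>
    simp only [List.getD_cons_succ]
    rw [pv_getD_dropLast (100 :: ord.dropLast) k (by simp [List.length_dropLast]; omega)]
    match k with
    | 0 => simp
    | Nat.succ j =>
      simp only [List.getD_cons_succ]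
      rw [pv_getD_take ord (ord.length - 2) j (by omega) (by omega),
          pv_getD_dropLast ord j (by omega)]

theorem pv_q3_agree (ord : List Int) (i : Nat) (hi : i < ord.length) :
    (100 :: 100 :: 100 :: ord.take (ord.length - 3)).getD i 0
      = (100 :: (100 :: (100 :: ord.dropLast).dropLast).dropLast).getD i 0 := by
  match i with
  | 0 => simp
  | Nat.succ k =>
    simp only [List.getD_cons_succ]
    rw [pv_getD_dropLast (100 :: (100 :: ord.dropLast).dropLast) k
      (by simp [List.length_dropLast]; omega)]
    match k with
    | 0 => simp
    | Nat.succ j =>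
      simp only [List.getD_cons_succ]
      rw [pv_getD_dropLast (100 :: ord.dropLast) j (by simp [List.length_dropLast]; omega)]
      match j with
      | 0 => simp
      | Nat.succ m =>
        simp only [List.getD_cons_succ]
        rw [pv_getD_take ord (ord.length - 3) m (by omega) (by omega),
            pv_getD_dropLast ord m (by omega)]

theorem pvA_eq_canon (xs : List Int) :
    get_prev_galaxies xs = pvCanon 100 100 100 (pvGroupby xs) := by
  simp only [get_prev_galaxies, PySem.List.pyGetD_zero]
  set gs := pvGroupby xs with hgs
  set ord := gs.map (fun x => x.getD 0 0) with hord
  have hlen : ord.length = gs.length := by simp [hord]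
  rw [PySem.List.slice_to_neg_one, PySem.List.slice_to_neg_ofNat ord 2 (by omega),
      PySem.List.slice_to_neg_ofNat ord 3 (by omega)]
  rw [pvLoopA gs _ _ _ (by simp [List.length_dropLast]; omega)
      (by simp [List.length_take, hlen]; omega) (by simp [List.length_take, hlen]; omega)]
  rw [pvCanon_mix]
  simp only [List.cons_append, List.nil_append]
  refine Prod.ext rfl (Prod.ext ?_ ?_)
  · exact pvMix_congr gs _ _ (fun i hi => pv_q2_agree ord i (by omega))
      (by simp [List.length_take, hlen]; omega) (by simp [List.length_dropLast]; omega)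
  · exact pvMix_congr gs _ _ (fun i hi => pv_q3_agree ord i (by omega))
      (by simp [List.length_take, hlen]; omega) (by simp [List.length_dropLast]; omega)

-- ----- B side -----
theorem pvRunConst (t : List Int) (v : Int) (ht : ∀ y ∈ t, y = v)
    (w1 w2 w3 : Int) (a1 a2 a3 : List Int) :
    t.foldl pvAltStep ((w1, w2, w3), some v, (a1, a2, a3)) =
      ((w1, w2, w3), some v,
        (a1 ++ List.replicate t.length w1, a2 ++ List.replicate t.length w2,
         a3 ++ List.replicate t.length w3)) := by
  induction t generalizing a1 a2 a3 with
  | nil => simp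
  | cons y ys ih =>
    have hy : y = v := ht y (by simp)
    simp only [List.foldl_cons]
    rw [show pvAltStep ((w1, w2, w3), some v, (a1, a2, a3)) y =
        ((w1, w2, w3), some v, (a1 ++ [w1], a2 ++ [w2], a3 ++ [w3])) by
      simp [pvAltStep, hy]]
    rw [ih (fun z hz => ht z (by simp [hz]))]
    simp [List.replicate_succ, List.append_assoc]

theorem pvBRest (gs : List (List Int)) (v : Int) (hg : pvGoodChain v gs)
    (w1 w2 w3 : Int) (a1 a2 a3 : List Int) :
    (gs.flatten.foldl pvAltStep ((w1, w2, w3), some v, (a1, a2, a3))).2.2 =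
      (a1 ++ (pvCanon v w1 w2 gs).1, a2 ++ (pvCanon v w1 w2 gs).2.1,
       a3 ++ (pvCanon v w1 w2 gs).2.2) := by
  induction gs generalizing v w1 w2 w3 a1 a2 a3 with
  | nil => simp [pvCanon]
  | cons g rest ih =>
    obtain ⟨h, t, rfl, ht, hne, hchain⟩ := hg
    simp only [List.flatten_cons, List.foldl_append, List.foldl_cons]
    rw [show pvAltStep ((w1, w2, w3), some v, (a1, a2, a3)) h =
        ((v, w1, w2), some h, (a1 ++ [v], a2 ++ [w1], a3 ++ [w2])) by
      simp [pvAltStep, hne]]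
    rw [pvRunConst t h ht]
    rw [ih h hchain]
    simp [pvCanon, List.replicate_succ, List.append_assoc]

theorem pvB_eq_canon (xs : List Int) :
    get_prev_galaxies_alt xs = pvCanon 100 100 100 (pvGroupby xs) := by
  unfold get_prev_galaxies_alt
  cases xs with
  | nil => simp [pvGroupby, pvCanon]
  | cons x t =>
    conv_lhs => rw [show x :: t = (pvGroupby (x :: t)).flatten from (pvGroupby_flatten _).symm]
    rw [pvGroupby]
    simp only [List.flatten_cons, List.foldl_append, List.foldl_cons]
    rw [show pvAltStep ((100, 100, 100), none, ([], [], [])) x =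
        ((100, 100, 100), some x, ([100], [100], [100])) by simp [pvAltStep]]
    rw [pvRunConst (t.takeWhile (· == x)) x
      (fun z hz => by simpa using List.mem_takeWhile_imp hz)]
    rw [pvBRest (pvGroupby (t.dropWhile (· == x))) x
      (pvGroupby_goodChain x _ (fun hne => by
        simpa using List.head_dropWhile_not (· == x) hne))]
    simp [pvCanon, List.replicate_succ]

-- ===== VERDICT (by name: the statement is the Claim_ definition above) =====
theorem get_prev_galaxies_spec : Claim_equal_get_prev_galaxies := by
  intro xs _
  unfold Spec_get_prev_galaxies
  rw [pvA_eq_canon, pvB_eq_canon]
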